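-- pv_equiv track=rewrite | github.com/gregf-ai/Michelin-GregF | src/graph.py | _classify_route
-- ===== SOURCE A (Python) =====
-- def _classify_route(text: str) -> str:
--     """Heuristic router for selecting the most relevant tool subset."""
--     q = (text or "").lower()
--
--     patent_terms = [
--         "patent", "usp to", "uspto", "filing", "application", "claims", "invention", "ip",
--     ]
--     transcript_terms = [
--         "transcript", "earnings call", "call", "management commentary", "quote", "conference call",
--         "said", "guidance", "prepared remarks",
--     ]
--     financial_terms = [
--         "income statement", "revenue", "margin", "roic", "roe", "roa", "cash flow", "ebitda",
--         "dividend", "stock", "ratio", "profit", "balance sheet",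
--     ]
--
--     has_patent = any(term in q for term in patent_terms)
--     has_transcript = any(term in q for term in transcript_terms)
--     has_financial = any(term in q for term in financial_terms)
--
--     domains = sum([has_patent, has_transcript, has_financial])
--     if domains >= 2:
--         return "mixed"
--     if has_patent:
--         return "patent"
--     if has_transcript:
--         return "transcript"
--     if has_financial:
--         return "financial"
--     return "mixed"
-- ===== SOURCE B (Python) =====
-- def _classify_route(text: str) -> str:
--     """Heuristic router for selecting the most relevant tool subset."""
--     q = (text or "").lower()
--     pairs = (
--         [("patent", t) for t in (
--             "patent", "usp to", "uspto", "filing", "application", "claims", "invention", "ip",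
--         )]
--         + [("transcript", t) for t in (
--             "transcript", "earnings call", "call", "management commentary", "quote",
--             "conference call", "said", "guidance", "prepared remarks",
--         )]
--         + [("financial", t) for t in (
--             "income statement", "revenue", "margin", "roic", "roe", "roa", "cash flow",
--             "ebitda", "dividend", "stock", "ratio", "profit", "balance sheet",
--         )]
--     )
--     found = None
--     for name, term in pairs:
--         if term in q:
--             if found is None:
--                 found = name
--             elif found != name:
--                 return "mixed"
--     return found if found is not None else "mixed"
-- ===== Notes on version B (the rewrite author's own statement) =====
-- stated objective: alternative
-- what changed: Replaces the three boolean flags, their sum and the four-branch cascade by one streaming pass over a flattened (name, term) pair list with an Option accumulator that records the first matching domain and returns 'mixed' early as soon as a second distinct domain matches.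
import Mathlib
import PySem

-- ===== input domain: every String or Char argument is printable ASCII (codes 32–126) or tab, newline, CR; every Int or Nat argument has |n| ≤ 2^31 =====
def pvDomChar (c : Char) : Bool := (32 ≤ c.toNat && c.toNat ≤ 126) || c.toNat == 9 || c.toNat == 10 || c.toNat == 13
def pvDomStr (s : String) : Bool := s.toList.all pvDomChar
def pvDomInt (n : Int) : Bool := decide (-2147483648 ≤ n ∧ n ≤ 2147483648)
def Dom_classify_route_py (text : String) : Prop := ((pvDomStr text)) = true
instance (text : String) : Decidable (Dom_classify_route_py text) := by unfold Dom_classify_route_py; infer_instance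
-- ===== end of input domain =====

-- B replaces A's three flags + sum + if-cascade by ONE streaming pass over a flattened
-- (name, term) pair list with an Option accumulator and early exit on a second distinct
-- domain (objective: alternative; same cost).

-- ===== PORT A =====
def classify_route_py (text : String) : String :=
  let q := PySem.Str.lower text    -- (text or "") = text for a string; identical after .lower()
  let patent_terms : List String :=
    ["patent", "usp to", "uspto", "filing", "application", "claims", "invention", "ip"]
  let transcript_terms : List String :=
    ["transcript", "earnings call", "call", "management commentary", "quote", "conference call",
     "said", "guidance", "prepared remarks"]
  let financial_terms : List String :=
    ["income statement", "revenue", "margin", "roic", "roe", "roa", "cash flow", "ebitda",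
     "dividend", "stock", "ratio", "profit", "balance sheet"]
  let has_patent := patent_terms.any (fun t => PySem.Str.isIn t q)
  let has_transcript := transcript_terms.any (fun t => PySem.Str.isIn t q)
  let has_financial := financial_terms.any (fun t => PySem.Str.isIn t q)
  let domains : Int :=
    [has_patent, has_transcript, has_financial].foldl (fun s b => s + (if b then 1 else 0)) 0
  if domains ≥ 2 then "mixed"
  else if has_patent then "patent"
  else if has_transcript then "transcript"
  else if has_financial then "financial"
  else "mixed"

-- ===== PORT B =====
-- the for-loop of Source B with its early return: structural recursion over the pair list,
-- carrying the Option accumulator 'found'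
def pvRouteLoop (q : String) : List (String × String) → Option String → String
  | [], found => found.getD "mixed"
  | (name, term) :: rest, found =>
      if PySem.Str.isIn term q then
        match found with
        | none => pvRouteLoop q rest (some name)
        | some f => if f ≠ name then "mixed" else pvRouteLoop q rest (some f)
      else pvRouteLoop q rest found

def classify_route_py_alt (text : String) : String :=
  let q := PySem.Str.lower text
  let pairs : List (String × String) :=
    (["patent", "usp to", "uspto", "filing", "application", "claims", "invention", "ip"].map
        (fun t => ("patent", t)))
    ++ (["transcript", "earnings call", "call", "management commentary", "quote",
         "conference call", "said", "guidance", "prepared remarks"].map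
        (fun t => ("transcript", t)))
    ++ (["income statement", "revenue", "margin", "roic", "roe", "roa", "cash flow", "ebitda",
         "dividend", "stock", "ratio", "profit", "balance sheet"].map
        (fun t => ("financial", t)))
  pvRouteLoop q pairs none

-- ===== PRECONDITION & SPEC =====
def Spec_classify_route_py (text : String) (out : String) : Prop := out = classify_route_py_alt text
instance (text : String) (out : String) : Decidable (Spec_classify_route_py text out) := by unfold Spec_classify_route_py; infer_instance

-- ===== CLAIM (what is proved, stated in full; the proofs are below) =====
def Claim_equal_classify_route_py : Prop := ∀ (text : String), Dom_classify_route_py text → Spec_classify_route_py text (classify_route_py text)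

-- ===== LEMMAS AND PROOFS =====

-- a homogeneous group whose name is already the found one changes nothing
theorem pvLoop_same (q n : String) (L : List String) (rest : List (String × String)) :
    pvRouteLoop q (L.map (fun t => (n, t)) ++ rest) (some n) = pvRouteLoop q rest (some n) := by
  induction L with
  | nil => rfl
  | cons t L ih => simp [pvRouteLoop, ih]

-- a homogeneous group against a DIFFERENT found name: any match ends in "mixed"
theorem pvLoop_other (q n f : String) (hne : f ≠ n) (L : List String)
    (rest : List (String × String)) :
    pvRouteLoop q (L.map (fun t => (n, t)) ++ rest) (some f)
      = if L.any (fun t => PySem.Str.isIn t q) then "mixed" else pvRouteLoop q rest (some f) := by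
  induction L with
  | nil => simp
  | cons t L ih =>
      by_cases h : PySem.Chars.isIn t.toList q.toList = true
      · simp [pvRouteLoop, h, hne]
      · simp [pvRouteLoop, h, ih]

-- a homogeneous group from 'none': sets the accumulator iff some term matches
theorem pvLoop_none (q n : String) (L : List String) (rest : List (String × String)) :
    pvRouteLoop q (L.map (fun t => (n, t)) ++ rest) none
      = if L.any (fun t => PySem.Str.isIn t q) then pvRouteLoop q rest (some n)
        else pvRouteLoop q rest none := by
  induction L with
  | nil => simp
  | cons t L ih =>
      by_cases h : PySem.Chars.isIn t.toList q.toList = true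
      · simp [pvRouteLoop, h, pvLoop_same]
      · simp [pvRouteLoop, h, ih]

-- the rest = [] corollaries (for the last group of the concatenation)
theorem pvLoop_other_nil (q n f : String) (hne : f ≠ n) (L : List String) :
    pvRouteLoop q (L.map (fun t => (n, t))) (some f)
      = if L.any (fun t => PySem.Str.isIn t q) then "mixed" else f := by
  simpa [pvRouteLoop] using pvLoop_other q n f hne L []

theorem pvLoop_none_nil (q n : String) (L : List String) :
    pvRouteLoop q (L.map (fun t => (n, t))) none
      = if L.any (fun t => PySem.Str.isIn t q) then n else "mixed" := by
  simpa [pvRouteLoop] using pvLoop_none q n L []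

-- the flags+sum+cascade (A's shape) equals the streaming pass (B's shape), generically
theorem pvRouteKey (q : String) (L1 L2 L3 : List String) :
    (if ([L1.any (fun t => PySem.Str.isIn t q), L2.any (fun t => PySem.Str.isIn t q),
          L3.any (fun t => PySem.Str.isIn t q)].foldl
            (fun s b => s + (if b then (1 : Int) else 0)) 0) ≥ 2 then "mixed"
      else if L1.any (fun t => PySem.Str.isIn t q) then "patent"
      else if L2.any (fun t => PySem.Str.isIn t q) then "transcript"
      else if L3.any (fun t => PySem.Str.isIn t q) then "financial"
      else "mixed")
    = pvRouteLoop q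
        (L1.map (fun t => ("patent", t)) ++ L2.map (fun t => ("transcript", t))
          ++ L3.map (fun t => ("financial", t))) none := by
  rw [List.append_assoc, pvLoop_none q "patent",
      pvLoop_other q "transcript" "patent" (by decide),
      pvLoop_none q "transcript",
      pvLoop_other_nil q "financial" "patent" (by decide),
      pvLoop_other_nil q "financial" "transcript" (by decide),
      pvLoop_none_nil q "financial"]
  simp only [List.foldl_cons, List.foldl_nil, ge_iff_le]
  split_ifs <;> first | rfl | omega

-- ===== VERDICT (by name: the statement is the Claim_ definition above) =====
theorem classify_route_py_spec : Claim_equal_classify_route_py := by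
  intro text _
  unfold Spec_classify_route_py classify_route_py classify_route_py_alt
  exact pvRouteKey (PySem.Str.lower text) _ _ _
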